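-- pv_equiv track=rewrite | github.com/yujin204617-hash/sona | report_html_template.py | _summarize_phase_status
-- ===== SOURCE A (Python) =====
-- from typing import Any, Dict, List, Optional, Set, Tuple
--
-- def _classify_lifecycle_stage(values: List[int]) -> List[str]:
--     """按时间点给出唯一生命周期阶段（潜伏/扩散/爆发/衰退/衍生/结束）。"""
--     if not values:
--         return []
--
--     n = len(values)
--     seed = [max(0, int(v)) for v in values]
--     peak_idx = max(range(n), key=lambda i: seed[i])
--     max_v = max(max(seed), 1)
--     stages: List[str] = []
--     trailing_window = max(2, min(4, n))
--     trailing_sum = sum(seed[-trailing_window:])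
--     trailing_avg = trailing_sum / float(trailing_window)
--     is_ending = trailing_avg <= max_v * 0.08 and seed[-1] <= max_v * 0.06
--
--     # 次峰（衍生期）检测：主峰后出现明显回升
--     derivative = [seed[i] - seed[i - 1] for i in range(1, n)]
--     second_peak_idx = -1
--     second_peak_val = 0
--     for i in range(peak_idx + 2, n - 1):
--         if seed[i] >= seed[i - 1] and seed[i] >= seed[i + 1] and seed[i] >= int(max_v * 0.45):
--             if seed[i] > second_peak_val:
--                 second_peak_val = seed[i]
--                 second_peak_idx = i
--
--     for i, v in enumerate(seed):
--         # 峰值附近视为爆发期（主峰前后）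
--         if abs(i - peak_idx) <= 1 or v >= int(max_v * 0.82):
--             stages.append("爆发")
--             continue
--
--         # 峰值之前：低基线为潜伏，斜率明显上升转扩散
--         if i < peak_idx:
--             slope = derivative[i - 1] if i - 1 >= 0 and i - 1 < len(derivative) else 0
--             if v <= int(max_v * 0.18) and slope <= int(max_v * 0.08):
--                 stages.append("潜伏")
--             else:
--                 stages.append("扩散")
--             continue
--
--         # 次峰附近判定为衍生期（第二轮小高潮）
--         if second_peak_idx > 0 and abs(i - second_peak_idx) <= 1:
--             stages.append("衍生")
--             continue
--
--         # 峰值之后：先扩散，再衰退；末端接近归零时标记结束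
--         if is_ending and i >= n - trailing_window:
--             stages.append("结束")
--         elif v >= int(max_v * 0.35):
--             stages.append("扩散")
--         else:
--             stages.append("衰退")
--
--     return stages
--
-- def _summarize_phase_status(values: List[int]) -> str:
--     """给出当前周期阶段判定文案。"""
--     if not values:
--         return "待评估（证据不足）"
--     stages = _classify_lifecycle_stage([max(0, int(v)) for v in values])
--     if not stages:
--         return "待评估（证据不足）"
--     latest = stages[-1]
--     return f"{latest}期"
-- ===== SOURCE B (Python) =====
-- def _summarize_phase_status(values):
--     """Directly compute the lifecycle label of the latest point, skipping the full per-index stage list."""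
--     if not values:
--         return "待评估（证据不足）"
--     seed = [max(0, int(v)) for v in values]
--     n = len(seed)
--     max_v = max(max(seed), 1)
--     peak_idx = max(range(n), key=lambda i: seed[i])
--     v = seed[-1]
--     # Near the main peak, or high enough: burst.
--     if abs((n - 1) - peak_idx) <= 1 or v >= int(max_v * 0.82):
--         return "爆发期"
--     # The last index can only sit next to a second peak at n-2: check that position directly.
--     thr = int(max_v * 0.45)
--
--     def qual(j):
--         return seed[j] >= seed[j - 1] and seed[j] >= seed[j + 1] and seed[j] >= thr
--
--     if peak_idx + 2 <= n - 2 and qual(n - 2) and \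
--             seed[n - 2] > max([0] + [seed[k] for k in range(peak_idx + 2, n - 2) if qual(k)]):
--         return "衍生期"
--     trailing_window = max(2, min(4, n))
--     trailing_sum = sum(seed[-trailing_window:])
--     if trailing_sum / float(trailing_window) <= max_v * 0.08 and v <= max_v * 0.06:
--         return "结束期"
--     if v >= int(max_v * 0.35):
--         return "扩散期"
--     return "衰退期"
-- ===== Notes on version B (the rewrite author's own statement) =====
-- stated objective: simpler
-- what changed: B drops the per-index classification loop, the stage list and the derivative list entirely: it evaluates A's branch chain only at the latest index (where the pre-peak branch is unreachable and the trailing-window test is always true) and replaces the running second-peak argmax scan by a direct check that position n-2 qualifies and strictly dominates the earlier qualifying positions.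
import Mathlib
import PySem

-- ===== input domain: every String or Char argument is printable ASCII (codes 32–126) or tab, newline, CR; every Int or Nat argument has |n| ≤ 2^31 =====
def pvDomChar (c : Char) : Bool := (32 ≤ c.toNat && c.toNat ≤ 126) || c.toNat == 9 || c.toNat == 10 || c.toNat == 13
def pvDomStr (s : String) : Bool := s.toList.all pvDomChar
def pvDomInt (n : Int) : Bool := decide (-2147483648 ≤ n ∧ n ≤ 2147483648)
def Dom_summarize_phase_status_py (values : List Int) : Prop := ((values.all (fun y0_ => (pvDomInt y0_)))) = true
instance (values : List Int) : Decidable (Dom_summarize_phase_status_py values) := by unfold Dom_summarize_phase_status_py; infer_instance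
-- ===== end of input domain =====

-- B computes the latest point's label directly (one branch chain, no per-index stage list,
-- no derivative list); same return value as A on every input. Objective: simpler.

-- ===== PORT A =====
-- Shared hand-written IEEE-754 double helpers (PySem has no float support). A nonnegative
-- double is represented by its exact value (m, k) = m / 2^k. `pvRoundD p q` rounds the
-- rational p/q to the nearest double (ties to even); exact for the magnitudes arising here
-- (all values lie in the normal range, far from overflow/subnormal), validated against CPython.
def pvRhe (a b : Nat) : Nat :=
  -- round-half-even of a/b (b > 0)
  let q := a / b; let r := a % b
  if 2 * r < b then q else if b < 2 * r then q + 1 else q + q % 2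

def pvRoundD (p q : Nat) : Nat × Nat :=
  if p = 0 ∨ q = 0 then (0, 0)
  else
    -- e is the unique exponent with p/q ∈ [2^(e-1), 2^e); mantissa = 53 bits, round half-even
    let e : Int := (Nat.log2 (p * 2 ^ 64 / q) : Int) - 63
    if e ≤ 53 then (pvRhe (p * 2 ^ (53 - e).toNat) q, (53 - e).toNat)
    else (pvRhe p (q * 2 ^ (e - 53).toNat) * 2 ^ (e - 53).toNat, 0)

-- x * c  for a Python int x ≥ 0 (< 2^53, so float(x) is exact) and a double constant c
def pvDMul (x : Nat) (c : Nat × Nat) : Nat × Nat := pvRoundD (x * c.1) (2 ^ c.2)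
-- a / float(b)  for Python ints a ≥ 0, b > 0
def pvDDiv (a b : Nat) : Nat × Nat := pvRoundD a b
-- double ≤ double (exact rational comparison, as in IEEE)
def pvDLe (a b : Nat × Nat) : Bool := decide (a.1 * 2 ^ b.2 ≤ b.1 * 2 ^ a.2)
-- int(x) for a double x ≥ 0 (truncation)
def pvDTrunc (a : Nat × Nat) : Nat := a.1 / 2 ^ a.2

-- nearest doubles to the literals 0.82, 0.45, 0.35, 0.18, 0.08, 0.06 (from float.as_integer_ratio)
def pvC82 : Nat × Nat := (7385903388887613, 53)
def pvC45 : Nat × Nat := (8106479329266893, 54)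
def pvC35 : Nat × Nat := (3152519739159347, 53)
def pvC18 : Nat × Nat := (3242591731706757, 54)
def pvC08 : Nat × Nat := (5764607523034235, 56)
def pvC06 : Nat × Nat := (1080863910568919, 54)

-- _classify_lifecycle_stage, transliterated
def pvClassify (values : List Int) : List String :=
  if values = [] then []
  else
    let n : Int := PySem.List.len values
    let seed : List Int := values.map (fun v => max 0 v)
    let peak_idx : Int :=
      (PySem.List.max? (PySem.List.pyRange 0 n 1) (fun i => PySem.List.pyGetD seed i 0)).getD 0  -- range nonempty here
    let max_v : Int := max ((PySem.List.max? seed (fun y => y)).getD 0) 1  -- seed nonempty here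
    let trailing_window : Int := max 2 (min 4 n)
    let trailing_sum : Int := (PySem.List.slice seed (some (-trailing_window)) none).sum
    let trailing_avg : Nat × Nat := pvDDiv trailing_sum.toNat trailing_window.toNat  -- both ≥ 0 here
    let is_ending : Bool :=
      pvDLe trailing_avg (pvDMul max_v.toNat pvC08) &&
      pvDLe ((PySem.List.pyGetD seed (-1) 0).toNat, 0) (pvDMul max_v.toNat pvC06)
    let derivative : List Int :=
      (PySem.List.pyRange 1 n 1).map (fun i => PySem.List.pyGetD seed i 0 - PySem.List.pyGetD seed (i - 1) 0)
    -- (second_peak_idx, second_peak_val)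
    let sp : Int × Int :=
      (PySem.List.pyRange (peak_idx + 2) (n - 1) 1).foldl (fun s i =>
        if PySem.List.pyGetD seed i 0 ≥ PySem.List.pyGetD seed (i - 1) 0 ∧
           PySem.List.pyGetD seed i 0 ≥ PySem.List.pyGetD seed (i + 1) 0 ∧
           PySem.List.pyGetD seed i 0 ≥ (pvDTrunc (pvDMul max_v.toNat pvC45) : Int) then
          (if PySem.List.pyGetD seed i 0 > s.2 then (i, PySem.List.pyGetD seed i 0) else s)
        else s) (-1, 0)
    (PySem.List.enumerate seed 0).foldl (fun stages p =>
      if |p.1 - peak_idx| ≤ 1 ∨ p.2 ≥ (pvDTrunc (pvDMul max_v.toNat pvC82) : Int) then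
        stages ++ ["爆发"]
      else if p.1 < peak_idx then
        (let slope : Int :=
          if 0 ≤ p.1 - 1 ∧ p.1 - 1 < PySem.List.len derivative then
            PySem.List.pyGetD derivative (p.1 - 1) 0
          else 0
        if p.2 ≤ (pvDTrunc (pvDMul max_v.toNat pvC18) : Int) ∧
           slope ≤ (pvDTrunc (pvDMul max_v.toNat pvC08) : Int) then stages ++ ["潜伏"]
        else stages ++ ["扩散"])
      else if sp.1 > 0 ∧ |p.1 - sp.1| ≤ 1 then stages ++ ["衍生"]
      else if is_ending = true ∧ p.1 ≥ n - trailing_window then stages ++ ["结束"]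
      else if p.2 ≥ (pvDTrunc (pvDMul max_v.toNat pvC35) : Int) then stages ++ ["扩散"]
      else stages ++ ["衰退"]) []

def summarize_phase_status_py (values : List Int) : String :=
  if values = [] then "待评估（证据不足）"
  else
    let stages := pvClassify (values.map (fun v => max 0 v))
    if stages = [] then "待评估（证据不足）"
    else PySem.List.pyGetD stages (-1) "" ++ "期"

-- ===== PORT B =====
def summarize_phase_status_py_alt (values : List Int) : String :=
  if values = [] then "待评估（证据不足）"
  else
    let seed : List Int := values.map (fun v => max 0 v)
    let n : Int := PySem.List.len seed
    let max_v : Int := max ((PySem.List.max? seed (fun y => y)).getD 0) 1  -- seed nonempty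
    let peak_idx : Int :=
      (PySem.List.max? (PySem.List.pyRange 0 n 1) (fun i => PySem.List.pyGetD seed i 0)).getD 0
    let v : Int := PySem.List.pyGetD seed (-1) 0
    if |(n - 1) - peak_idx| ≤ 1 ∨ v ≥ (pvDTrunc (pvDMul max_v.toNat pvC82) : Int) then "爆发期"
    else
      let thr : Int := pvDTrunc (pvDMul max_v.toNat pvC45)
      let qual : Int → Bool := fun j =>
        decide (PySem.List.pyGetD seed j 0 ≥ PySem.List.pyGetD seed (j - 1) 0 ∧
                PySem.List.pyGetD seed j 0 ≥ PySem.List.pyGetD seed (j + 1) 0 ∧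
                PySem.List.pyGetD seed j 0 ≥ thr)
      if peak_idx + 2 ≤ n - 2 ∧ qual (n - 2) = true ∧
         PySem.List.pyGetD seed (n - 2) 0 >
           (PySem.List.max?
             (0 :: ((PySem.List.pyRange (peak_idx + 2) (n - 2) 1).filter qual).map
               (fun k => PySem.List.pyGetD seed k 0)) (fun y => y)).getD 0 then "衍生期"
      else
        let trailing_window : Int := max 2 (min 4 n)
        let trailing_sum : Int := (PySem.List.slice seed (some (-trailing_window)) none).sum
        if (pvDLe (pvDDiv trailing_sum.toNat trailing_window.toNat) (pvDMul max_v.toNat pvC08) &&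
            pvDLe (v.toNat, 0) (pvDMul max_v.toNat pvC06)) = true then "结束期"
        else if v ≥ (pvDTrunc (pvDMul max_v.toNat pvC35) : Int) then "扩散期"
        else "衰退期"

-- ===== PRECONDITION & SPEC =====
def Spec_summarize_phase_status_py (values : List Int) (out : String) : Prop := out = summarize_phase_status_py_alt values
instance (values : List Int) (out : String) : Decidable (Spec_summarize_phase_status_py values out) := by unfold Spec_summarize_phase_status_py; infer_instance

-- ===== CLAIM (what is proved, stated in full; the proofs are below) =====
def Claim_equal_summarize_phase_status_py : Prop := ∀ (values : List Int), Dom_summarize_phase_status_py values → Spec_summarize_phase_status_py values (summarize_phase_status_py values)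

-- ===== LEMMAS AND PROOFS =====

-- value accumulator of the second-peak scan: a running max over the qualifying indices
theorem pv_sp_snd (seed : List Int) (t : Int) :
    ∀ (l : List Int) (s : Int × Int),
    (l.foldl (fun s i =>
        if PySem.List.pyGetD seed i 0 ≥ PySem.List.pyGetD seed (i - 1) 0 ∧
           PySem.List.pyGetD seed i 0 ≥ PySem.List.pyGetD seed (i + 1) 0 ∧
           PySem.List.pyGetD seed i 0 ≥ t then
          (if PySem.List.pyGetD seed i 0 > s.2 then (i, PySem.List.pyGetD seed i 0) else s)
        else s) s).2
    = ((l.filter (fun j => decide (PySem.List.pyGetD seed j 0 ≥ PySem.List.pyGetD seed (j - 1) 0 ∧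
           PySem.List.pyGetD seed j 0 ≥ PySem.List.pyGetD seed (j + 1) 0 ∧
           PySem.List.pyGetD seed j 0 ≥ t))).foldl (fun a i => max a (PySem.List.pyGetD seed i 0)) s.2) := by
  intro l
  induction l with
  | nil => intro s; rfl
  | cons i l ih =>
    intro s
    by_cases hq : PySem.List.pyGetD seed i 0 ≥ PySem.List.pyGetD seed (i - 1) 0 ∧
        PySem.List.pyGetD seed i 0 ≥ PySem.List.pyGetD seed (i + 1) 0 ∧
        PySem.List.pyGetD seed i 0 ≥ t
    · have hd : (decide (PySem.List.pyGetD seed i 0 ≥ PySem.List.pyGetD seed (i - 1) 0 ∧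
          PySem.List.pyGetD seed i 0 ≥ PySem.List.pyGetD seed (i + 1) 0 ∧
          PySem.List.pyGetD seed i 0 ≥ t)) = true := decide_eq_true hq
      by_cases hgt : PySem.List.pyGetD seed i 0 > s.2
      · rw [List.foldl_cons, if_pos hq, if_pos hgt, ih]
        simp only [List.filter_cons, hd, if_true, List.foldl_cons]
        congr 1
        dsimp only
        omega
      · rw [List.foldl_cons, if_pos hq, if_neg hgt, ih]
        simp only [List.filter_cons, hd, if_true, List.foldl_cons]
        congr 1
        omega
    · have hd : (decide (PySem.List.pyGetD seed i 0 ≥ PySem.List.pyGetD seed (i - 1) 0 ∧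
          PySem.List.pyGetD seed i 0 ≥ PySem.List.pyGetD seed (i + 1) 0 ∧
          PySem.List.pyGetD seed i 0 ≥ t)) = false := decide_eq_false hq
      rw [List.foldl_cons, if_neg hq, ih]
      simp only [List.filter_cons, hd, Bool.false_eq_true, if_false]

-- index accumulator of the second-peak scan stays put or lands in the scanned range
theorem pv_sp_fst (seed : List Int) (t : Int) :
    ∀ (l : List Int) (s : Int × Int),
    (l.foldl (fun s i =>
        if PySem.List.pyGetD seed i 0 ≥ PySem.List.pyGetD seed (i - 1) 0 ∧
           PySem.List.pyGetD seed i 0 ≥ PySem.List.pyGetD seed (i + 1) 0 ∧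
           PySem.List.pyGetD seed i 0 ≥ t then
          (if PySem.List.pyGetD seed i 0 > s.2 then (i, PySem.List.pyGetD seed i 0) else s)
        else s) s).1 = s.1 ∨
    (l.foldl (fun s i =>
        if PySem.List.pyGetD seed i 0 ≥ PySem.List.pyGetD seed (i - 1) 0 ∧
           PySem.List.pyGetD seed i 0 ≥ PySem.List.pyGetD seed (i + 1) 0 ∧
           PySem.List.pyGetD seed i 0 ≥ t then
          (if PySem.List.pyGetD seed i 0 > s.2 then (i, PySem.List.pyGetD seed i 0) else s)
        else s) s).1 ∈ l := by
  intro l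
  induction l with
  | nil => intro s; left; rfl
  | cons i l ih =>
    intro s
    rw [List.foldl_cons]
    by_cases hq : PySem.List.pyGetD seed i 0 ≥ PySem.List.pyGetD seed (i - 1) 0 ∧
        PySem.List.pyGetD seed i 0 ≥ PySem.List.pyGetD seed (i + 1) 0 ∧
        PySem.List.pyGetD seed i 0 ≥ t
    · rw [if_pos hq]
      by_cases hgt : PySem.List.pyGetD seed i 0 > s.2
      · rw [if_pos hgt]
        rcases ih ((i, PySem.List.pyGetD seed i 0)) with h | h
        · right
          rw [h]
          exact List.mem_cons_self ..
        · right
          exact List.mem_cons_of_mem _ h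
      · rw [if_neg hgt]
        rcases ih s with h | h
        · left; exact h
        · right; exact List.mem_cons_of_mem _ h
    · rw [if_neg hq]
      rcases ih s with h | h
      · left; exact h
      · right; exact List.mem_cons_of_mem _ h

-- the second-peak branch can fire for the last index only when the second peak sits at N-1,
-- i.e. when N-1 qualifies and strictly dominates every earlier qualifying index
theorem pv_sp_cond (seed : List Int) (t : Int) (m N : Int) (hm0 : 0 ≤ m) :
    (((PySem.List.pyRange (m + 2) N 1).foldl (fun s i =>
        if PySem.List.pyGetD seed i 0 ≥ PySem.List.pyGetD seed (i - 1) 0 ∧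
           PySem.List.pyGetD seed i 0 ≥ PySem.List.pyGetD seed (i + 1) 0 ∧
           PySem.List.pyGetD seed i 0 ≥ t then
          (if PySem.List.pyGetD seed i 0 > s.2 then (i, PySem.List.pyGetD seed i 0) else s)
        else s) (-1, 0)).1 > 0 ∧
     |N - ((PySem.List.pyRange (m + 2) N 1).foldl (fun s i =>
        if PySem.List.pyGetD seed i 0 ≥ PySem.List.pyGetD seed (i - 1) 0 ∧
           PySem.List.pyGetD seed i 0 ≥ PySem.List.pyGetD seed (i + 1) 0 ∧
           PySem.List.pyGetD seed i 0 ≥ t then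
          (if PySem.List.pyGetD seed i 0 > s.2 then (i, PySem.List.pyGetD seed i 0) else s)
        else s) (-1, 0)).1| ≤ 1)
    ↔ (m + 2 ≤ N - 1 ∧
       (decide (PySem.List.pyGetD seed (N - 1) 0 ≥ PySem.List.pyGetD seed (N - 1 - 1) 0 ∧
           PySem.List.pyGetD seed (N - 1) 0 ≥ PySem.List.pyGetD seed (N - 1 + 1) 0 ∧
           PySem.List.pyGetD seed (N - 1) 0 ≥ t)) = true ∧
       PySem.List.pyGetD seed (N - 1) 0 >
         (PySem.List.max? (0 :: ((PySem.List.pyRange (m + 2) (N - 1) 1).filter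
             (fun j => decide (PySem.List.pyGetD seed j 0 ≥ PySem.List.pyGetD seed (j - 1) 0 ∧
                PySem.List.pyGetD seed j 0 ≥ PySem.List.pyGetD seed (j + 1) 0 ∧
                PySem.List.pyGetD seed j 0 ≥ t))).map
             (fun k => PySem.List.pyGetD seed k 0)) (fun y => y)).getD 0) := by
  by_cases hN : m + 2 ≤ N - 1
  · have hsplit : PySem.List.pyRange (m + 2) N 1 = PySem.List.pyRange (m + 2) (N - 1) 1 ++ [N - 1] := by
      have h1 := PySem.List.pyRange_one_succ_right (a := m + 2) (b := N - 1) (by omega)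
      rw [show N - 1 + 1 = N from by ring] at h1
      exact h1
    rw [hsplit, List.foldl_append, List.foldl_cons, List.foldl_nil]
    have h2 := pv_sp_snd seed t (PySem.List.pyRange (m + 2) (N - 1) 1) (-1, 0)
    have h1 := pv_sp_fst seed t (PySem.List.pyRange (m + 2) (N - 1) 1) (-1, 0)
    set sp0 := (PySem.List.pyRange (m + 2) (N - 1) 1).foldl (fun s i =>
        if PySem.List.pyGetD seed i 0 ≥ PySem.List.pyGetD seed (i - 1) 0 ∧
           PySem.List.pyGetD seed i 0 ≥ PySem.List.pyGetD seed (i + 1) 0 ∧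
           PySem.List.pyGetD seed i 0 ≥ t then
          (if PySem.List.pyGetD seed i 0 > s.2 then (i, PySem.List.pyGetD seed i 0) else s)
        else s) (-1, 0) with hsp0
    have hmax : (PySem.List.max? (0 :: ((PySem.List.pyRange (m + 2) (N - 1) 1).filter
             (fun j => decide (PySem.List.pyGetD seed j 0 ≥ PySem.List.pyGetD seed (j - 1) 0 ∧
                PySem.List.pyGetD seed j 0 ≥ PySem.List.pyGetD seed (j + 1) 0 ∧
                PySem.List.pyGetD seed j 0 ≥ t))).map
             (fun k => PySem.List.pyGetD seed k 0)) (fun y => y)).getD 0 = sp0.2 := by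
      rw [PySem.List.max?_id_cons, Option.getD_some, List.foldl_map, h2]
    have hb1 : sp0.1 = -1 ∨ (m + 2 ≤ sp0.1 ∧ sp0.1 < N - 1) := by
      rcases h1 with h | h
      · left; exact h
      · right; exact PySem.List.mem_pyRange_one.mp h
    rw [hmax]
    by_cases hq : PySem.List.pyGetD seed (N - 1) 0 ≥ PySem.List.pyGetD seed (N - 1 - 1) 0 ∧
        PySem.List.pyGetD seed (N - 1) 0 ≥ PySem.List.pyGetD seed (N - 1 + 1) 0 ∧
        PySem.List.pyGetD seed (N - 1) 0 ≥ t
    · rw [if_pos hq]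
      by_cases hgt : PySem.List.pyGetD seed (N - 1) 0 > sp0.2
      · rw [if_pos hgt]
        apply iff_of_true
        · refine ⟨by dsimp only; omega, ?_⟩
          dsimp only
          rw [abs_le]
          omega
        · exact ⟨hN, decide_eq_true hq, hgt⟩
      · rw [if_neg hgt]
        apply iff_of_false
        · rintro ⟨ha, hb⟩
          rw [abs_le] at hb
          omega
        · rintro ⟨-, -, hgt'⟩
          exact hgt hgt'
    · rw [if_neg hq]
      apply iff_of_false
      · rintro ⟨ha, hb⟩
        rw [abs_le] at hb
        omega
      · rintro ⟨-, hq', -⟩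
        exact hq (of_decide_eq_true hq')
  · rw [PySem.List.pyRange_one_eq_nil (by omega), List.foldl_nil]
    apply iff_of_false
    · rintro ⟨ha, -⟩
      exact absurd ha (by norm_num)
    · rintro ⟨ha, -⟩
      exact hN ha

-- last-index branch chain of A versus B's early-return chain, with all data abstracted
theorem pv_bridge (E : String) (st0 alt2 : List String)
    (c1 c2 c3A c3B c5 : Prop) [Decidable c1] [Decidable c2] [Decidable c3A] [Decidable c3B]
    [Decidable c5] (ie : Bool) (q : Prop) [Decidable q]
    (h2 : ¬ c2) (h3 : c3A ↔ c3B) (hq : q) :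
    (if (if c1 then st0 ++ ["爆发"] else if c2 then alt2
         else if c3A then st0 ++ ["衍生"] else if ie = true ∧ q then st0 ++ ["结束"]
         else if c5 then st0 ++ ["扩散"] else st0 ++ ["衰退"]) = [] then E
     else PySem.List.pyGetD (if c1 then st0 ++ ["爆发"] else if c2 then alt2
         else if c3A then st0 ++ ["衍生"] else if ie = true ∧ q then st0 ++ ["结束"]
         else if c5 then st0 ++ ["扩散"] else st0 ++ ["衰退"]) (-1) "" ++ "期")
    = (if c1 then "爆发期" else if c3B then "衍生期" else if ie = true then "结束期"
       else if c5 then "扩散期" else "衰退期") := by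
  by_cases hc1 : c1 <;> by_cases hc3 : c3A <;> by_cases hie : ie = true <;> by_cases hc5 : c5 <;>
    simp [hc1, h2, hc3, hie, hc5, hq, ← h3, List.append_eq_nil_iff,
      PySem.List.pyGetD_neg_one_append_singleton]

-- ===== VERDICT (by name: the statement is the Claim_ definition above) =====
set_option maxHeartbeats 1000000 in
theorem summarize_phase_status_py_spec : Claim_equal_summarize_phase_status_py := by
  intro values _
  unfold Spec_summarize_phase_status_py
  by_cases hv : values = []
  · simp [summarize_phase_status_py, summarize_phase_status_py_alt, hv]
  · unfold summarize_phase_status_py summarize_phase_status_py_alt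
    rw [if_neg hv, if_neg hv]
    have hidem : (values.map (fun v => max 0 v)).map (fun v => max 0 v)
        = values.map (fun v => max 0 v) := by
      rw [List.map_map]
      apply List.map_congr_left
      intro a _
      simp only [Function.comp_apply]
      omega
    set seed := values.map (fun v => max 0 v) with hseeddef
    have hsne : seed ≠ [] := by
      simpa [hseeddef] using hv
    unfold pvClassify
    rw [if_neg hsne]
    simp only [hidem]
    obtain ⟨ys, x, hsx⟩ : ∃ ys x, seed = ys ++ [x] :=
      ⟨seed.dropLast, seed.getLast hsne, (List.dropLast_append_getLast hsne).symm⟩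
    rw [hsx]
    simp only [PySem.List.len_eq, List.length_append, List.length_cons, List.length_nil,
      Nat.cast_add, Nat.cast_one, zero_add, PySem.List.pyGetD_neg_one_append_singleton]
    simp only [show ((ys.length : Int) + 1) - 1 = (ys.length : Int) from by ring,
      show ((ys.length : Int) + 1) - 2 = (ys.length : Int) - 1 from by ring]
    cases hm : PySem.List.max? (PySem.List.pyRange 0 ((ys.length : Int) + 1) 1)
        (fun i => PySem.List.pyGetD (ys ++ [x]) i 0) with
    | none =>
      exfalso
      rw [PySem.List.max?_eq_none_iff] at hm
      have hco := PySem.List.pyRange_one_cons (a := 0) (b := (ys.length : Int) + 1) (by omega)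
      rw [hco] at hm
      exact List.cons_ne_nil _ _ hm
    | some m =>
      simp only [Option.getD_some]
      have hpm : 0 ≤ m ∧ m < (ys.length : Int) + 1 := by
        have hmem := PySem.List.max?_mem hm
        exact PySem.List.mem_pyRange_one.mp hmem
      rw [PySem.List.enumerate_append]
      simp only [PySem.List.enumerate_cons, PySem.List.enumerate_nil, zero_add]
      rw [List.foldl_append, List.foldl_cons, List.foldl_nil]
      dsimp only
      have hgeq : (ys.length : Int) ≥ (ys.length : Int) + 1 - max 2 (min 4 ((ys.length : Int) + 1)) := by
        omega
      exact pv_bridge _ _ _ _ _ _ _ _ _ _ (by omega)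
        (pv_sp_cond (ys ++ [x])
          ((pvDTrunc (pvDMul (max ((PySem.List.max? (ys ++ [x]) (fun y => y)).getD 0) 1).toNat pvC45) : Int))
          m (ys.length : Int) hpm.1) hgeq
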